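-- pv_equiv track=rewrite | github.com/svetlin-mladenov/software-engineering-2223 | lectures/L11-maintainability/12_B/literal_types.py | strcmp
-- ===== SOURCE A (Python) =====
-- from typing import Annotated, Final, Literal
--
-- def clamp(val, min_val, max_val):
--     return max(min_val, min(max_val, val))
--
-- def strcmp(s1: str, s2: str) -> Literal[-1, 0, 1]:
--     len_diff: Final = len(s1) - len(s2)
--     if len_diff:
--         return clamp(len_diff, -1, 1)
--     len_diff = 0
--     for i in range(len(s1)):
--         if s1[i] != s2[i]:
--             return clamp(ord(s1[i]) - ord(s2[i]), -1, 1)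
--     return 0
-- ===== SOURCE B (Python) =====
-- def strcmp(s1: str, s2: str):
--     k1 = (len(s1), s1)
--     k2 = (len(s2), s2)
--     return (k1 > k2) - (k1 < k2)
-- ===== Notes on version B (the rewrite author's own statement) =====
-- stated objective: idiomatic
-- what changed: Replaces the length-diff branch, explicit index loop and clamp with two (len, s) comparison keys and the sign idiom (k1 > k2) - (k1 < k2), letting built-in tuple/string comparison do the scan.
import Mathlib
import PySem

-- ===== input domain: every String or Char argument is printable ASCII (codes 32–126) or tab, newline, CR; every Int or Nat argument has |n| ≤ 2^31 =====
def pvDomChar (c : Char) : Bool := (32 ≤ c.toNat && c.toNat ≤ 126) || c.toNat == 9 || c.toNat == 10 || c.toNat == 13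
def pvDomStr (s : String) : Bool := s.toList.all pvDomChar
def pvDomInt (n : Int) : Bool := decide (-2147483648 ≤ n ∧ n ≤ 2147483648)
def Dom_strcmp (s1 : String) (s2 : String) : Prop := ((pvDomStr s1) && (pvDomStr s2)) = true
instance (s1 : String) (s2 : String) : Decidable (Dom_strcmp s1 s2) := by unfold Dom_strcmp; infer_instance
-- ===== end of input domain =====

-- B replaces A's length-diff branch, index loop and clamp with (len, s) comparison keys and the sign idiom (idiomatic).


-- ===== PORT A =====
-- clamp(val, min_val, max_val)
def pvClamp (val min_val max_val : Int) : Int := max min_val (min max_val val)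

-- the for-loop over i in range(len(s1)): lengths are equal here, so walk the two char lists in step
def strcmpLoop : List Char → List Char → Int
  | c1 :: t1, c2 :: t2 => if c1 ≠ c2 then pvClamp ((c1.toNat : Int) - (c2.toNat : Int)) (-1) 1 else strcmpLoop t1 t2
  | _, _ => 0

def strcmp (s1 : String) (s2 : String) : Int :=
  let len_diff : Int := (s1.toList.length : Int) - (s2.toList.length : Int)
  if len_diff ≠ 0 then pvClamp len_diff (-1) 1
  else strcmpLoop s1.toList s2.toList

-- ===== PORT B =====
-- Python tuple comparison on (int, str): first components, then code-point lexicographic on the strings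
def pvKeyLt (a b : Int × List Char) : Bool := a.1 < b.1 || (a.1 == b.1 && decide (a.2 < b.2))

def strcmp_alt (s1 : String) (s2 : String) : Int :=
  let k1 : Int × List Char := ((s1.toList.length : Int), s1.toList)
  let k2 : Int × List Char := ((s2.toList.length : Int), s2.toList)
  (if pvKeyLt k2 k1 then (1 : Int) else 0) - (if pvKeyLt k1 k2 then (1 : Int) else 0)

-- ===== PRECONDITION & SPEC =====
def Spec_strcmp (s1 : String) (s2 : String) (out : Int) : Prop := out = strcmp_alt s1 s2
instance (s1 : String) (s2 : String) (out : Int) : Decidable (Spec_strcmp s1 s2 out) := by unfold Spec_strcmp; infer_instance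

-- ===== CLAIM (what is proved, stated in full; the proofs are below) =====
def Claim_equal_strcmp : Prop := ∀ (s1 : String) (s2 : String), Dom_strcmp s1 s2 → Spec_strcmp s1 s2 (strcmp s1 s2)

-- ===== LEMMAS AND PROOFS =====
theorem char_lt_iff_toNat (a b : Char) : a < b ↔ a.toNat < b.toNat := by
  rw [Char.lt_def, UInt32.lt_iff_toNat_lt]; exact Iff.rfl

theorem char_eq_of_toNat {a b : Char} (h : a.toNat = b.toNat) : a = b :=
  Char.ext (UInt32.toNat.inj h)

theorem strcmpLoop_eq_sign (l1 l2 : List Char) (h : l1.length = l2.length) :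
    strcmpLoop l1 l2 = (if l2 < l1 then (1 : Int) else 0) - (if l1 < l2 then (1 : Int) else 0) := by
  induction l1 generalizing l2 with
  | nil =>
    cases l2 with
    | nil => simp [strcmpLoop]
    | cons c t => simp at h
  | cons c1 t1 ih =>
    cases l2 with
    | nil => simp at h
    | cons c2 t2 =>
      simp only [List.length_cons, Nat.add_right_cancel_iff] at h
      by_cases hc : c1 = c2
      · subst hc
        rw [strcmpLoop, if_neg (by simp), ih t2 h]
        simp
      · rw [strcmpLoop, if_pos hc]
        have hne : c1.toNat ≠ c2.toNat := fun he => hc (char_eq_of_toNat he)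
        rcases Nat.lt_or_ge c1.toNat c2.toNat with hlt | hge
        · have h12 : (c1 :: t1) < (c2 :: t2) := List.Lex.rel ((char_lt_iff_toNat c1 c2).mpr hlt)
          have h21 : ¬ (c2 :: t2) < (c1 :: t1) := by
            simp only [List.cons_lt_cons_iff, char_lt_iff_toNat, not_or, not_and]
            exact ⟨by omega, fun he => absurd (congrArg Char.toNat he) (by omega)⟩
          rw [if_neg h21, if_pos h12]
          simp only [pvClamp]; omega
        · have hlt' : c2.toNat < c1.toNat := by omega
          have h21 : (c2 :: t2) < (c1 :: t1) := List.Lex.rel ((char_lt_iff_toNat c2 c1).mpr hlt')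
          have h12 : ¬ (c1 :: t1) < (c2 :: t2) := by
            simp only [List.cons_lt_cons_iff, char_lt_iff_toNat, not_or, not_and]
            exact ⟨by omega, fun he => absurd (congrArg Char.toNat he) (by omega)⟩
          rw [if_pos h21, if_neg h12]
          simp only [pvClamp]; omega

-- ===== VERDICT (by name: the statement is the Claim_ definition above) =====
theorem strcmp_spec : Claim_equal_strcmp := by
  intro s1 s2 _
  unfold Spec_strcmp strcmp strcmp_alt pvKeyLt
  set l1 := s1.toList
  set l2 := s2.toList
  by_cases hlen : l1.length = l2.length
  · simp only [hlen, sub_self, ne_eq, not_true_eq_false, if_false, lt_self_iff_false,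
      decide_false, beq_self_eq_true, Bool.true_and, Bool.false_or]
    rw [strcmpLoop_eq_sign l1 l2 hlen]
    simp
  · have hne : ((l1.length : Int) - (l2.length : Int)) ≠ 0 := by
      intro h; exact hlen (by omega)
    rw [if_pos hne]
    have hb : ((l1.length : Int) == (l2.length : Int)) = false := by
      simp; omega
    have hb2 : ((l2.length : Int) == (l1.length : Int)) = false := by
      simp; omega
    simp only [hb, hb2, Bool.false_and, Bool.or_false, decide_eq_true_eq, pvClamp]
    split_ifs <;> omega
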